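-- pv_equiv track=rewrite | github.com/kaliv0/leet-fleet | leet/dynamic_programming/3592_inverse_coin_change.py | find_coins
-- ===== SOURCE A (Python) =====
-- def find_coins(num_ways: list[int]) -> list[int]:
--     num_ways = [1] + num_ways  # add base case for zero
--     res = []
--
--     for i in range(1, len(num_ways)):
--         if num_ways[i] > 1:
--             return []
--         if num_ways[i] == 0:
--             continue
--
--         res.append(i)
--         for j in range(len(num_ways) - 1, i - 1, -1):
--             num_ways[j] -= num_ways[j - i]
--             if num_ways[j] < 0:
--                 return []
--     return res
-- ===== SOURCE B (Python) =====
-- def find_coins(num_ways: list[int]) -> list[int]: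
--     n = len(num_ways)
--     ways = [1] + [0] * n  # ways[j] = combinations summing to j using coins found so far
--     coins = []
--     for i in range(1, n + 1):
--         diff = num_ways[i - 1] - ways[i]
--         if diff < 0 or diff > 1:
--             return []
--         if diff == 1:
--             coins.append(i)
--             for j in range(i, n + 1):
--                 ways[j] += ways[j - i]
--     return coins
-- ===== Notes on version B (the rewrite author's own statement) =====
-- stated objective: alternative
-- what changed: B reconstructs a separate ways array additively (forward knapsack updates driven by each discovered coin, comparing it to the given array) instead of A's destructive backward in-place deconvolution of the input copy.
import Mathlib
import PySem

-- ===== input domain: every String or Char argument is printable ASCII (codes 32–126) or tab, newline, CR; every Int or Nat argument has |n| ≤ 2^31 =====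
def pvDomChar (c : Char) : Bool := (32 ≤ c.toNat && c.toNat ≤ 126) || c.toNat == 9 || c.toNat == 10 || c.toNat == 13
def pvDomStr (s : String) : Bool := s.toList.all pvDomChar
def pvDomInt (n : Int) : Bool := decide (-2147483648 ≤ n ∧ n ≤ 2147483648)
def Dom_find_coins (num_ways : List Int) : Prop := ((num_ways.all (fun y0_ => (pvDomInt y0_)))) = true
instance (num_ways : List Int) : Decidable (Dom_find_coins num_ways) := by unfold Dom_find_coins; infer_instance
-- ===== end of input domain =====

-- B rebuilds the number-of-ways table forward (additively) from the coins it discovers instead of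
-- destructively deconvolving the input array backward in place; same exact results, similar cost.

-- ===== PORT A =====
-- inner loop: for j in range(len-1, i-1, -1): a[j] -= a[j-i]; if a[j] < 0: return []  (none = early return)
def pvSubA (i : Nat) (a : List Int) (j : Nat) (fuel : Nat) : Option (List Int) :=
  match fuel with
  | 0 => some a
  | fuel' + 1 =>
    if j < i then some a
    else
      let v := a.getD j 0 - a.getD (j - i) 0
      if v < 0 then none else pvSubA i (a.set j v) (j - 1) fuel'

-- outer loop: for i in range(1, len(num_ways)):
def pvOutA (m : Nat) (a : List Int) (res : List Int) (i : Nat) (fuel : Nat) : List Int :=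
  match fuel with
  | 0 => res
  | fuel' + 1 =>
    if m ≤ i then res
    else if 1 < a.getD i 0 then []
    else if a.getD i 0 = 0 then pvOutA m a res (i + 1) fuel'
    else
      match pvSubA i a (m - 1) m with
      | none => []
      | some a' => pvOutA m a' (res ++ [(i : Int)]) (i + 1) fuel'

def find_coins (num_ways : List Int) : List Int :=
  let a := 1 :: num_ways
  pvOutA a.length a [] 1 a.length

-- ===== PORT B =====
-- inner loop: for j in range(i, n + 1): ways[j] += ways[j - i]
def pvAddB (i : Nat) (w : List Int) (j : Nat) (fuel : Nat) : List Int :=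
  match fuel with
  | 0 => w
  | fuel' + 1 =>
    if w.length ≤ j then w
    else pvAddB i (w.set j (w.getD j 0 + w.getD (j - i) 0)) (j + 1) fuel'

-- outer loop: for i in range(1, n + 1):
def pvOutB (nw : List Int) (w : List Int) (coins : List Int) (i : Nat) (fuel : Nat) : List Int :=
  match fuel with
  | 0 => coins
  | fuel' + 1 =>
    if w.length ≤ i then coins
    else
      let d := nw.getD (i - 1) 0 - w.getD i 0
      if d < 0 ∨ 1 < d then []
      else if d = 1 then pvOutB nw (pvAddB i w i w.length) (coins ++ [(i : Int)]) (i + 1) fuel'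
      else pvOutB nw w coins (i + 1) fuel'

def find_coins_alt (num_ways : List Int) : List Int :=
  pvOutB num_ways (1 :: List.replicate num_ways.length 0) [] 1 (num_ways.length + 1)

-- ===== PRECONDITION & SPEC =====
def Spec_find_coins (num_ways : List Int) (out : List Int) : Prop := out = find_coins_alt num_ways
instance (num_ways : List Int) (out : List Int) : Decidable (Spec_find_coins num_ways out) := by unfold Spec_find_coins; infer_instance

-- ===== CLAIM (what is proved, stated in full; the proofs are below) =====
def Claim_equal_find_coins : Prop := ∀ (num_ways : List Int), Dom_find_coins num_ways → Spec_find_coins num_ways (find_coins num_ways)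

-- ===== LEMMAS AND PROOFS =====

-- getD toolbox
theorem pvGetD_set (a : List Int) (j k : Nat) (v : Int) :
    (a.set j v).getD k 0 = if j = k ∧ j < a.length then v else a.getD k 0 := by
  simp only [List.getD_eq_getElem?_getD, List.getElem?_set]
  split
  · rename_i hjk
    subst hjk
    by_cases h : j < a.length <;> simp [h]
  · rename_i hjk
    simp [hjk]

theorem pvEq_of_getD (a b : List Int) (hl : a.length = b.length)
    (h : ∀ k, a.getD k 0 = b.getD k 0) : a = b := by
  apply List.ext_getElem hl
  intro k h1 h2
  have := h k
  rwa [List.getD_eq_getElem a 0 h1, List.getD_eq_getElem b 0 h2] at this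

theorem pvGetD_map_range (f : Nat → Int) (L k : Nat) :
    (((List.range L).map f).getD k 0) = if k < L then f k else 0 := by
  by_cases h : k < L
  · rw [List.getD_eq_getElem _ _ (by simpa using h)]
    simp [h]
  · rw [List.getD_eq_default]
    · simp [h]
    · simpa using Nat.le_of_not_lt h

-- fCoef i w j = j-th coefficient after the forward update of coin i (pointwise recursion)
def fCoef (i : Nat) (w : List Int) (j : Nat) : Int :=
  if h : 1 ≤ i ∧ i ≤ j then fCoef i w (j - i) + w.getD j 0 else w.getD j 0
termination_by j
decreasing_by omega

def fl (i : Nat) (w : List Int) : List Int := (List.range w.length).map (fCoef i w)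

def sUpdTo (i hi : Nat) (a : List Int) : List Int :=
  (List.range a.length).map
    (fun p => if i ≤ p ∧ p ≤ hi then a.getD p 0 - a.getD (p - i) 0 else a.getD p 0)

def wChain (cs : List Nat) (w : List Int) : List Int := cs.foldl (fun w c => fl c w) w

def eBase (n : Nat) : List Int := 1 :: List.replicate n 0

-- abstract runs (coins as List Nat; none = early return [])
def runA (m : Nat) (a : List Int) (i : Nat) (fuel : Nat) : Option (List Nat) :=
  match fuel with
  | 0 => some []
  | fuel' + 1 =>
    if m ≤ i then some []
    else if 1 < a.getD i 0 then none
    else if a.getD i 0 = 0 then runA m a (i + 1) fuel'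
    else if ∀ k < m, i ≤ k → 0 ≤ a.getD k 0 - a.getD (k - i) 0 then
      (runA m (sUpdTo i (m - 1) a) (i + 1) fuel').map (i :: ·)
    else none

def runB (nw : List Int) (m : Nat) (w : List Int) (i : Nat) (fuel : Nat) : Option (List Nat) :=
  match fuel with
  | 0 => some []
  | fuel' + 1 =>
    if m ≤ i then some []
    else
      let d := nw.getD (i - 1) 0 - w.getD i 0
      if d < 0 ∨ 1 < d then none
      else if d = 1 then (runB nw m (fl i w) (i + 1) fuel').map (i :: ·)
      else runB nw m w (i + 1) fuel'

-- basic fCoef / fl / sUpdTo facts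
theorem fCoef_lt (i : Nat) (w : List Int) (j : Nat) (h : j < i) : fCoef i w j = w.getD j 0 := by
  rw [fCoef]
  simp only [dif_neg (by omega : ¬ (1 ≤ i ∧ i ≤ j))]

theorem fCoef_ge (i : Nat) (w : List Int) (j : Nat) (h1 : 1 ≤ i) (h2 : i ≤ j) :
    fCoef i w j = fCoef i w (j - i) + w.getD j 0 := by
  rw [fCoef]
  simp only [dif_pos (by omega : 1 ≤ i ∧ i ≤ j)]

theorem fCoef_nonneg (i : Nat) (w : List Int) (j : Nat) (h : ∀ k, 0 ≤ w.getD k 0) :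
    0 ≤ fCoef i w j := by
  induction j using Nat.strong_induction_on with
  | _ j ih =>
    rw [fCoef]
    split
    · rename_i hc
      have := ih (j - i) (by omega)
      have := h j
      omega
    · exact h j

theorem length_fl (i : Nat) (w : List Int) : (fl i w).length = w.length := by
  simp [fl]

theorem getD_fl (i : Nat) (w : List Int) (j : Nat) (h : j < w.length) :
    (fl i w).getD j 0 = fCoef i w j := by
  rw [fl, pvGetD_map_range]
  simp [h]

theorem getD_fl_lt (i : Nat) (w : List Int) (j : Nat) (h : j < i) :
    (fl i w).getD j 0 = w.getD j 0 := by
  by_cases hj : j < w.length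
  · rw [getD_fl i w j hj, fCoef_lt i w j h]
  · rw [List.getD_eq_default _ _ (by simpa [length_fl] using Nat.le_of_not_lt hj),
      List.getD_eq_default _ _ (Nat.le_of_not_lt hj)]

theorem length_sUpdTo (i hi : Nat) (a : List Int) : (sUpdTo i hi a).length = a.length := by
  simp [sUpdTo]

theorem getD_sUpdTo (i hi : Nat) (a : List Int) (p : Nat) (h : p < a.length) :
    (sUpdTo i hi a).getD p 0 =
      if i ≤ p ∧ p ≤ hi then a.getD p 0 - a.getD (p - i) 0 else a.getD p 0 := by
  rw [sUpdTo, pvGetD_map_range]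
  simp [h]

-- inverse pair
theorem sUpdTo_fl (i : Nat) (w : List Int) (h : 1 ≤ i) :
    sUpdTo i (w.length - 1) (fl i w) = w := by
  apply pvEq_of_getD
  · rw [length_sUpdTo, length_fl]
  · intro k
    by_cases hk : k < w.length
    · rw [getD_sUpdTo _ _ _ _ (by rwa [length_fl])]
      by_cases hik : i ≤ k
      · have hle : k ≤ w.length - 1 := by omega
        rw [if_pos ⟨hik, hle⟩, getD_fl i w k hk, getD_fl i w (k - i) (by omega),
          fCoef_ge i w k h hik]
        ring
      · rw [if_neg (by tauto), getD_fl i w k hk, fCoef_lt i w k (by omega)]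
    · rw [List.getD_eq_default _ _ (by rw [length_sUpdTo, length_fl]; omega),
        List.getD_eq_default _ _ (by omega)]

theorem fl_sUpdTo (i : Nat) (a : List Int) (h : 1 ≤ i) :
    fl i (sUpdTo i (a.length - 1) a) = a := by
  apply pvEq_of_getD
  · rw [length_fl, length_sUpdTo]
  · intro k
    by_cases hk : k < a.length
    · rw [getD_fl _ _ _ (by rwa [length_sUpdTo])]
      have key : ∀ j, j < a.length → fCoef i (sUpdTo i (a.length - 1) a) j = a.getD j 0 := by
        intro j
        induction j using Nat.strong_induction_on with
        | _ j ih =>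
          intro hj
          by_cases hij : i ≤ j
          · rw [fCoef_ge _ _ _ h hij, ih (j - i) (by omega) (by omega),
              getD_sUpdTo _ _ _ _ hj, if_pos ⟨hij, by omega⟩]
            ring
          · rw [fCoef_lt _ _ _ (by omega), getD_sUpdTo _ _ _ _ hj, if_neg (by tauto)]
      exact key k hk
    · rw [List.getD_eq_default _ _ (by rw [length_fl, length_sUpdTo]; omega),
        List.getD_eq_default _ _ (by omega)]

-- commutativity
theorem fCoef_comm (i1 i2 : Nat) (w : List Int) (h1 : 1 ≤ i1) (h2 : 1 ≤ i2) (j : Nat)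
    (hj : j < w.length) : fCoef i1 (fl i2 w) j = fCoef i2 (fl i1 w) j := by
  by_cases heq : i1 = i2
  · subst heq; rfl
  induction j using Nat.strong_induction_on with
  | _ j ih =>
    by_cases ha : i1 ≤ j <;> by_cases hb : i2 ≤ j
    · -- both coins fit
      rw [fCoef_ge i1 (fl i2 w) j h1 ha, getD_fl i2 w j hj,
        fCoef_ge i2 (fl i1 w) j h2 hb, getD_fl i1 w j hj,
        ih (j - i1) (by omega) (by omega),
        ← ih (j - i2) (by omega) (by omega),
        fCoef_ge i2 w j h2 hb, fCoef_ge i1 w j h1 ha]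
      by_cases hab : i1 + i2 ≤ j
      · rw [fCoef_ge i2 (fl i1 w) (j - i1) h2 (by omega), getD_fl i1 w (j - i1) (by omega),
          fCoef_ge i1 (fl i2 w) (j - i2) h1 (by omega), getD_fl i2 w (j - i2) (by omega)]
        have hidx : j - i2 - i1 = j - i1 - i2 := by omega
        rw [hidx, ih (j - i1 - i2) (by omega) (by omega)]
        ring
      · rw [fCoef_lt i2 (fl i1 w) (j - i1) (by omega), getD_fl i1 w (j - i1) (by omega),
          fCoef_lt i1 (fl i2 w) (j - i2) (by omega), getD_fl i2 w (j - i2) (by omega)]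
        ring
    · -- i1 ≤ j < i2
      rw [fCoef_ge i1 (fl i2 w) j h1 ha, getD_fl i2 w j hj, fCoef_lt i2 w j (by omega),
        fCoef_lt i2 (fl i1 w) j (by omega), getD_fl i1 w j hj, fCoef_ge i1 w j h1 ha,
        ih (j - i1) (by omega) (by omega),
        fCoef_lt i2 (fl i1 w) (j - i1) (by omega), getD_fl i1 w (j - i1) (by omega)]
    · -- i2 ≤ j < i1
      rw [fCoef_lt i1 (fl i2 w) j (by omega), getD_fl i2 w j hj, fCoef_ge i2 w j h2 hb,
        fCoef_ge i2 (fl i1 w) j h2 hb, getD_fl i1 w j hj, fCoef_lt i1 w j (by omega),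
        ← ih (j - i2) (by omega) (by omega),
        fCoef_lt i1 (fl i2 w) (j - i2) (by omega), getD_fl i2 w (j - i2) (by omega)]
    · rw [fCoef_lt i1 (fl i2 w) j (by omega), getD_fl i2 w j hj, fCoef_lt i2 w j (by omega),
        fCoef_lt i2 (fl i1 w) j (by omega), getD_fl i1 w j hj, fCoef_lt i1 w j (by omega)]

theorem fl_comm (i1 i2 : Nat) (w : List Int) (h1 : 1 ≤ i1) (h2 : 1 ≤ i2) :
    fl i1 (fl i2 w) = fl i2 (fl i1 w) := by
  apply pvEq_of_getD
  · rw [length_fl, length_fl, length_fl, length_fl]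
  · intro k
    by_cases hk : k < w.length
    · rw [getD_fl _ _ _ (by rwa [length_fl]), getD_fl _ _ _ (by rwa [length_fl]),
        fCoef_comm i1 i2 w h1 h2 k hk]
    · rw [List.getD_eq_default _ _ (by rw [length_fl, length_fl]; omega),
        List.getD_eq_default _ _ (by rw [length_fl, length_fl]; omega)]

-- wChain facts
theorem length_wChain (cs : List Nat) (w : List Int) : (wChain cs w).length = w.length := by
  induction cs generalizing w with
  | nil => rfl
  | cons c cs ih => rw [wChain, List.foldl_cons, ← wChain, ih, length_fl]

theorem wChain_fl_comm (cs : List Nat) (i : Nat) (w : List Int) (hi : 1 ≤ i)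
    (hcs : ∀ c ∈ cs, 1 ≤ c) : wChain cs (fl i w) = fl i (wChain cs w) := by
  induction cs generalizing w with
  | nil => rfl
  | cons c cs ih =>
    calc wChain (c :: cs) (fl i w) = wChain cs (fl c (fl i w)) := rfl
      _ = wChain cs (fl i (fl c w)) := by rw [fl_comm c i w (hcs c (by simp)) hi]
      _ = fl i (wChain cs (fl c w)) := ih (fl c w) (fun x hx => hcs x (by simp [hx]))
      _ = fl i (wChain (c :: cs) w) := rfl

theorem getD_wChain_lt (cs : List Nat) (w : List Int) (j : Nat) (h : ∀ c ∈ cs, j < c) :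
    (wChain cs w).getD j 0 = w.getD j 0 := by
  induction cs generalizing w with
  | nil => rfl
  | cons c cs ih =>
    calc (wChain (c :: cs) w).getD j 0 = (wChain cs (fl c w)).getD j 0 := rfl
      _ = (fl c w).getD j 0 := ih (fl c w) (fun x hx => h x (by simp [hx]))
      _ = w.getD j 0 := getD_fl_lt c w j (h c (by simp))

theorem getD_wChain_nonneg (cs : List Nat) (w : List Int) (h : ∀ k, 0 ≤ w.getD k 0) (k : Nat) :
    0 ≤ (wChain cs w).getD k 0 := by
  induction cs generalizing w with
  | nil => exact h k
  | cons c cs ih =>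
    rw [wChain, List.foldl_cons, ← wChain]
    refine ih (fl c w) ?_ 
    intro p
    by_cases hp : p < w.length
    · rw [getD_fl c w p hp]
      exact fCoef_nonneg c w p h
    · rw [List.getD_eq_default _ _ (by rw [length_fl]; omega)]

theorem getD_eBase (n k : Nat) : (eBase n).getD k 0 = if k = 0 then 1 else 0 := by
  match k with
  | 0 => rfl
  | k + 1 =>
    simp only [eBase, List.getD_cons_succ]
    by_cases hk : k < n
    · rw [List.getD_eq_getElem _ _ (by simpa using hk)]
      simp
    · rw [List.getD_eq_default _ _ (by simpa using Nat.le_of_not_lt hk)]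
      simp

-- port characterizations
theorem pvSubA_some (i : Nat) (fuel : Nat) : ∀ (j : Nat) (a : List Int), 1 ≤ i → j < fuel →
    (∀ k, i ≤ k → k ≤ j → 0 ≤ a.getD k 0 - a.getD (k - i) 0) →
    pvSubA i a j fuel = some (sUpdTo i j a) := by
  induction fuel with
  | zero => intro j a _ h2 _; omega
  | succ fuel ih =>
    intro j a h1 h2 h3
    rw [pvSubA]
    by_cases hji : j < i
    · rw [if_pos hji]
      congr 1
      apply pvEq_of_getD
      · rw [length_sUpdTo]
      · intro k
        by_cases hk : k < a.length
        · rw [getD_sUpdTo _ _ _ _ hk, if_neg (by omega)]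
        · rw [List.getD_eq_default a _ (by omega),
            List.getD_eq_default (sUpdTo i j a) _ (by rw [length_sUpdTo]; omega)]
    · rw [if_neg hji]
      have hv : ¬ a.getD j 0 - a.getD (j - i) 0 < 0 := by
        have := h3 j (by omega) (by omega)
        omega
      simp only [if_neg hv]
      rw [ih (j - 1) (a.set j (a.getD j 0 - a.getD (j - i) 0)) h1 (by omega) ?_]
      · congr 1
        apply pvEq_of_getD
        · rw [length_sUpdTo, length_sUpdTo, List.length_set]
        · intro k
          by_cases hk : k < a.length
          · rw [getD_sUpdTo _ _ _ _ (by rwa [List.length_set]), getD_sUpdTo _ _ _ _ hk]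
            by_cases hkj : j = k
            · subst hkj
              simp only [pvGetD_set, true_and]
              split_ifs <;> first | rfl | (exfalso; omega)
            · simp only [pvGetD_set]
              split_ifs <;> first | rfl | (exfalso; omega)
          · rw [List.getD_eq_default (sUpdTo i (j - 1) (a.set j (a.getD j 0 - a.getD (j - i) 0))) _
                (by rw [length_sUpdTo, List.length_set]; omega),
              List.getD_eq_default (sUpdTo i j a) _ (by rw [length_sUpdTo]; omega)]
      · intro k hik hkj
        have h4 : ¬(j = k ∧ j < a.length) := by omega
        have h5 : ¬(j = k - i ∧ j < a.length) := by omega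
        rw [pvGetD_set, pvGetD_set, if_neg h4, if_neg h5]
        exact h3 k hik (by omega)

theorem pvSubA_none (i : Nat) (fuel : Nat) : ∀ (j : Nat) (a : List Int), 1 ≤ i → j < fuel →
    (∃ k, i ≤ k ∧ k ≤ j ∧ a.getD k 0 - a.getD (k - i) 0 < 0) →
    pvSubA i a j fuel = none := by
  induction fuel with
  | zero => intro j a _ h2 _; omega
  | succ fuel ih =>
    intro j a h1 h2 h3
    obtain ⟨k, hik, hkj, hneg⟩ := h3
    rw [pvSubA]
    rw [if_neg (by omega)]
    by_cases hv : a.getD j 0 - a.getD (j - i) 0 < 0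
    · simp only [if_pos hv]
    · simp only [if_neg hv]
      have hkj' : k ≠ j := by intro h; subst h; omega
      apply ih (j - 1) _ h1 (by omega)
      refine ⟨k, hik, by omega, ?_⟩
      have h4 : ¬(j = k ∧ j < a.length) := by omega
      have h5 : ¬(j = k - i ∧ j < a.length) := by omega
      rw [pvGetD_set, pvGetD_set, if_neg h4, if_neg h5]
      exact hneg

theorem pvAddB_inv (i : Nat) (w0 : List Int) (hi : 1 ≤ i) (fuel : Nat) :
    ∀ (j : Nat) (w : List Int), i ≤ j → w.length = w0.length →
    (∀ p, p < j → w.getD p 0 = fCoef i w0 p) →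
    (∀ p, j ≤ p → w.getD p 0 = w0.getD p 0) →
    w0.length ≤ j + fuel →
    pvAddB i w j fuel = fl i w0 := by
  induction fuel with
  | zero =>
    intro j w hij hlen hpre hpost hfuel
    rw [pvAddB]
    apply pvEq_of_getD
    · rw [hlen, length_fl]
    · intro k
      by_cases hk : k < w0.length
      · rw [getD_fl i w0 k hk, hpre k (by omega)]
      · rw [List.getD_eq_default w _ (by omega),
          List.getD_eq_default (fl i w0) _ (by rw [length_fl]; omega)]
  | succ fuel ih =>
    intro j w hij hlen hpre hpost hfuel
    rw [pvAddB]
    by_cases hj : w.length ≤ j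
    · rw [if_pos hj]
      apply pvEq_of_getD
      · rw [hlen, length_fl]
      · intro k
        by_cases hk : k < w0.length
        · rw [getD_fl i w0 k hk, hpre k (by omega)]
        · rw [List.getD_eq_default w _ (by omega),
            List.getD_eq_default (fl i w0) _ (by rw [length_fl]; omega)]
    · rw [if_neg hj]
      apply ih (j + 1) _ (by omega) (by rw [List.length_set]; exact hlen)
      · intro p hp
        rw [pvGetD_set]
        by_cases hpj : j = p
        · subst hpj
          rw [if_pos ⟨rfl, by omega⟩, hpost j (le_refl j), hpre (j - i) (by omega),
            fCoef_ge i w0 j hi hij]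
          ring
        · rw [if_neg (by tauto), hpre p (by omega)]
      · intro p hp
        rw [pvGetD_set, if_neg (by omega), hpost p (by omega)]
      · omega

theorem pvAddB_fl (i : Nat) (w : List Int) (h : 1 ≤ i) : pvAddB i w i w.length = fl i w := by
  apply pvAddB_inv i w h w.length i w (le_refl i) rfl
  · intro p hp
    rw [fCoef_lt i w p hp]
  · intro p _
    rfl
  · omega

theorem pvOutA_runA (m : Nat) (hm : 1 ≤ m) (fuel : Nat) :
    ∀ (i : Nat) (a res : List Int), 1 ≤ i → a.length = m →
    pvOutA m a res i fuel =
      (match runA m a i fuel with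
       | none => []
       | some l => res ++ l.map Int.ofNat) := by
  induction fuel with
  | zero => intro i a res _ _; simp [pvOutA, runA]
  | succ fuel ih =>
    intro i a res h1 hlen
    rw [pvOutA, runA]
    by_cases him : m ≤ i
    · rw [if_pos him, if_pos him]; simp
    · rw [if_neg him, if_neg him]
      by_cases hgt : 1 < a.getD i 0
      · rw [if_pos hgt, if_pos hgt]
      · rw [if_neg hgt, if_neg hgt]
        by_cases hz : a.getD i 0 = 0
        · rw [if_pos hz, if_pos hz]
          exact ih (i + 1) a res (by omega) hlen
        · rw [if_neg hz, if_neg hz]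
          by_cases hC : ∀ k < m, i ≤ k → 0 ≤ a.getD k 0 - a.getD (k - i) 0
          · rw [if_pos hC,
              pvSubA_some i m (m - 1) a h1 (by omega)
                (fun k hk1 hk2 => hC k (by omega) hk1)]
            have hih := ih (i + 1) (sUpdTo i (m - 1) a) (res ++ [(i : Int)]) (by omega)
              (by rw [length_sUpdTo]; exact hlen)
            cases hr : runA m (sUpdTo i (m - 1) a) (i + 1) fuel with
            | none => rw [hr] at hih; simp [hih]
            | some l => rw [hr] at hih; simp [hih, List.append_assoc]
          · rw [if_neg hC]
            have hex : ∃ k, i ≤ k ∧ k ≤ m - 1 ∧ a.getD k 0 - a.getD (k - i) 0 < 0 := by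
              push Not at hC
              obtain ⟨k, h1k, h2k, h3k⟩ := hC
              exact ⟨k, h2k, by omega, by omega⟩
            rw [pvSubA_none i m (m - 1) a h1 (by omega) hex]

theorem pvOutB_runB (nw : List Int) (m : Nat) (fuel : Nat) :
    ∀ (i : Nat) (w coins : List Int), 1 ≤ i → w.length = m →
    pvOutB nw w coins i fuel =
      (match runB nw m w i fuel with
       | none => []
       | some l => coins ++ l.map Int.ofNat) := by
  induction fuel with
  | zero => intro i w coins _ _; simp [pvOutB, runB]
  | succ fuel ih =>
    intro i w coins h1 hlen
    rw [pvOutB, runB]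
    rw [hlen]
    by_cases him : m ≤ i
    · rw [if_pos him, if_pos him]; simp
    · rw [if_neg him, if_neg him]
      by_cases hbad : nw.getD (i - 1) 0 - w.getD i 0 < 0 ∨ 1 < nw.getD (i - 1) 0 - w.getD i 0
      · rw [if_pos hbad, if_pos hbad]
      · rw [if_neg hbad, if_neg hbad]
        by_cases hd : nw.getD (i - 1) 0 - w.getD i 0 = 1
        · rw [if_pos hd, if_pos hd,
            show pvAddB i w i m = fl i w from by rw [← hlen]; exact pvAddB_fl i w h1]
          have hih := ih (i + 1) (fl i w) (coins ++ [(i : Int)]) (by omega)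
            (by rw [length_fl]; exact hlen)
          cases hr : runB nw m (fl i w) (i + 1) fuel with
          | none => rw [hr] at hih; simp [hih]
          | some l => rw [hr] at hih; simp [hih, List.append_assoc]
        · rw [if_neg hd, if_neg hd]
          exact ih (i + 1) w coins (by omega) hlen

-- runB bookkeeping
theorem runB_mem (nw : List Int) (m : Nat) (fuel : Nat) :
    ∀ (i : Nat) (w : List Int) (l : List Nat), runB nw m w i fuel = some l →
    ∀ x ∈ l, i ≤ x ∧ x < m := by
  induction fuel with
  | zero =>
    intro i w l h x hx
    rw [runB] at h
    cases h
    cases hx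
  | succ fuel ih =>
    intro i w l h x hx
    rw [runB] at h
    by_cases him : m ≤ i
    · rw [if_pos him] at h
      cases h
      cases hx
    · rw [if_neg him] at h
      by_cases hbad : nw.getD (i - 1) 0 - w.getD i 0 < 0 ∨ 1 < nw.getD (i - 1) 0 - w.getD i 0
      · rw [if_pos hbad] at h
        cases h
      · rw [if_neg hbad] at h
        by_cases hd : nw.getD (i - 1) 0 - w.getD i 0 = 1
        · rw [if_pos hd] at h
          cases hr : runB nw m (fl i w) (i + 1) fuel with
          | none => rw [hr] at h; cases h
          | some l' =>
            rw [hr] at h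
            simp only [Option.map_some, Option.some.injEq] at h
            subst h
            rcases List.mem_cons.mp hx with hx | hx
            · subst hx
              exact ⟨le_refl x, by omega⟩
            · have := ih (i + 1) (fl i w) l' hr x hx
              exact ⟨by omega, this.2⟩
        · rw [if_neg hd] at h
          have := ih (i + 1) w l h x hx
          exact ⟨by omega, this.2⟩

theorem runB_wchain (nw : List Int) (m : Nat) (fuel : Nat) :
    ∀ (i : Nat) (w : List Int) (l : List Nat), 1 ≤ i → w.length = m → w.getD 0 0 = 1 →
    m ≤ i + fuel → runB nw m w i fuel = some l →
    ∀ k, i ≤ k → k < m → (wChain l w).getD k 0 = (1 :: nw).getD k 0 := by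
  induction fuel with
  | zero =>
    intro i w l h1 hlen hw0 hfuel hrun k hik hkm
    omega
  | succ fuel ih =>
    intro i w l h1 hlen hw0 hfuel hrun k hik hkm
    rw [runB] at hrun
    by_cases him : m ≤ i
    · omega
    · rw [if_neg him] at hrun
      by_cases hbad : nw.getD (i - 1) 0 - w.getD i 0 < 0 ∨ 1 < nw.getD (i - 1) 0 - w.getD i 0
      · rw [if_pos hbad] at hrun
        cases hrun
      · rw [if_neg hbad] at hrun
        have hGi : ((1 : Int) :: nw).getD i 0 = nw.getD (i - 1) 0 := by
          have hieq : i = (i - 1) + 1 := by omega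
          rw [hieq]
          rfl
        have hfl0 : (fl i w).getD 0 0 = 1 := by
          rw [getD_fl i w 0 (by omega), fCoef_lt i w 0 (by omega), hw0]
        by_cases hd : nw.getD (i - 1) 0 - w.getD i 0 = 1
        · rw [if_pos hd] at hrun
          cases hr : runB nw m (fl i w) (i + 1) fuel with
          | none => rw [hr] at hrun; cases hrun
          | some l' =>
            rw [hr] at hrun
            simp only [Option.map_some, Option.some.injEq] at hrun
            subst hrun
            have helems := runB_mem nw m fuel (i + 1) (fl i w) l' hr
            have hchain : wChain (i :: l') w = wChain l' (fl i w) := rfl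
            rw [hchain]
            by_cases hki : k = i
            · subst hki
              rw [getD_wChain_lt l' (fl k w) k (fun c hc => by have := (helems c hc).1; omega),
                getD_fl k w k (by omega), fCoef_ge k w k h1 (le_refl k), Nat.sub_self,
                fCoef_lt k w 0 (by omega), hw0, hGi]
              omega
            · exact ih (i + 1) (fl i w) l' (by omega) (by rw [length_fl]; exact hlen) hfl0
                (by omega) hr k (by omega) hkm
        · rw [if_neg hd] at hrun
          have helems := runB_mem nw m fuel (i + 1) w l hrun
          by_cases hki : k = i
          · subst hki
            rw [getD_wChain_lt l w k (fun c hc => by have := (helems c hc).1; omega), hGi]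
            omega
          · exact ih (i + 1) w l (by omega) hlen hw0 (by omega) hrun k (by omega) hkm

-- T1: B succeeds ⇒ A succeeds with the same coins (A's state is the forward composite)
theorem runA_of_runB (nw : List Int) (n : Nat) (fuel : Nat) :
    ∀ (i : Nat) (w : List Int) (l : List Nat), 1 ≤ i →
    runB nw (n + 1) w i fuel = some l →
    runA (n + 1) (wChain l (eBase n)) i fuel = some l := by
  induction fuel with
  | zero =>
    intro i w l h1 hrun
    rw [runB] at hrun
    cases hrun
    rfl
  | succ fuel ih =>
    intro i w l h1 hrun
    rw [runB] at hrun
    rw [runA]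
    by_cases him : n + 1 ≤ i
    · rw [if_pos him] at hrun
      rw [if_pos him]
      exact hrun
    · rw [if_neg him] at hrun
      rw [if_neg him]
      by_cases hbad : nw.getD (i - 1) 0 - w.getD i 0 < 0 ∨ 1 < nw.getD (i - 1) 0 - w.getD i 0
      · rw [if_pos hbad] at hrun
        cases hrun
      · rw [if_neg hbad] at hrun
        by_cases hd : nw.getD (i - 1) 0 - w.getD i 0 = 1
        · rw [if_pos hd] at hrun
          cases hr : runB nw (n + 1) (fl i w) (i + 1) fuel with
          | none => rw [hr] at hrun; cases hrun
          | some l' =>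
            rw [hr] at hrun
            simp only [Option.map_some, Option.some.injEq] at hrun
            subst hrun
            have helems := runB_mem nw (n + 1) fuel (i + 1) (fl i w) l' hr
            have hc1 : ∀ c ∈ l', 1 ≤ c := fun c hc => by have := (helems c hc).1; omega
            have hgt : ∀ c ∈ l', i < c := fun c hc => by have := (helems c hc).1; omega
            have hchain : wChain (i :: l') (eBase n) = fl i (wChain l' (eBase n)) := by
              calc wChain (i :: l') (eBase n) = wChain l' (fl i (eBase n)) := rfl
                _ = fl i (wChain l' (eBase n)) := wChain_fl_comm l' i (eBase n) h1 hc1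
            have hvlen : (wChain l' (eBase n)).length = n + 1 := by
              rw [length_wChain]; simp [eBase]
            have hvnn : ∀ k, 0 ≤ (wChain l' (eBase n)).getD k 0 := by
              intro k
              apply getD_wChain_nonneg
              intro p
              rw [getD_eBase]
              split <;> omega
            have hv0 : (wChain l' (eBase n)).getD 0 0 = 1 := by
              rw [getD_wChain_lt l' (eBase n) 0 (fun c hc => by have := hc1 c hc; omega),
                getD_eBase]
              rfl
            have hvi : (wChain l' (eBase n)).getD i 0 = 0 := by
              rw [getD_wChain_lt l' (eBase n) i hgt, getD_eBase, if_neg (by omega)]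
            have hai : (wChain (i :: l') (eBase n)).getD i 0 = 1 := by
              rw [hchain, getD_fl i _ i (by rw [hvlen]; omega),
                fCoef_ge i _ i h1 (le_refl i), Nat.sub_self,
                fCoef_lt i _ 0 (by omega), hv0, hvi]
              omega
            rw [if_neg (show ¬ 1 < (wChain (i :: l') (eBase n)).getD i 0 by rw [hai]; omega),
              if_neg (show ¬ (wChain (i :: l') (eBase n)).getD i 0 = 0 by rw [hai]; omega)]
            have hC : ∀ k < n + 1, i ≤ k →
                0 ≤ (wChain (i :: l') (eBase n)).getD k 0 -
                    (wChain (i :: l') (eBase n)).getD (k - i) 0 := by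
              intro k hk hik
              rw [hchain, getD_fl i _ k (by rw [hvlen]; omega),
                getD_fl i _ (k - i) (by rw [hvlen]; omega), fCoef_ge i _ k h1 hik]
              have := hvnn k
              omega
            rw [if_pos hC]
            have hs : sUpdTo i (n + 1 - 1) (wChain (i :: l') (eBase n)) = wChain l' (eBase n) := by
              rw [hchain]
              have := sUpdTo_fl i (wChain l' (eBase n)) h1
              rwa [hvlen] at this
            rw [hs, ih (i + 1) (fl i w) l' (by omega) hr]
            rfl
        · rw [if_neg hd] at hrun
          have helems := runB_mem nw (n + 1) fuel (i + 1) w l hrun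
          have hgt : ∀ c ∈ l, i < c := fun c hc => by have := (helems c hc).1; omega
          have hai : (wChain l (eBase n)).getD i 0 = 0 := by
            rw [getD_wChain_lt l (eBase n) i hgt, getD_eBase, if_neg (by omega)]
          rw [if_neg (show ¬ 1 < (wChain l (eBase n)).getD i 0 by rw [hai]; omega), if_pos hai]
          exact ih (i + 1) w l (by omega) hrun

-- T2a: A succeeds ⇒ its state is forced to be the forward composite of its coins
theorem runA_forces (nw : List Int) (n : Nat) (fuel : Nat) :
    ∀ (i : Nat) (a : List Int) (l : List Nat), runA (n + 1) a i fuel = some l → 1 ≤ i →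
    a.length = n + 1 → n + 1 ≤ i + fuel → a.getD 0 0 = 1 →
    (∀ k, 1 ≤ k → k < i → a.getD k 0 = 0) →
    a = wChain l (eBase n) ∧ (∀ x ∈ l, i ≤ x ∧ x < n + 1) ∧ l.Pairwise (· < ·) := by
  induction fuel with
  | zero =>
    intro i a l h h1 hlen hfuel ha0 hzero
    rw [runA] at h
    cases h
    refine ⟨?_, by simp, by simp⟩
    apply pvEq_of_getD
    · rw [hlen, show wChain [] (eBase n) = eBase n from rfl]; simp [eBase]
    · intro k
      rw [show wChain [] (eBase n) = eBase n from rfl, getD_eBase]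
      by_cases hk0 : k = 0
      · subst hk0; rw [if_pos rfl]; exact ha0
      · rw [if_neg hk0]
        by_cases hk : k < a.length
        · exact hzero k (by omega) (by omega)
        · exact List.getD_eq_default a _ (by omega)
  | succ fuel ih =>
    intro i a l h h1 hlen hfuel ha0 hzero
    rw [runA] at h
    by_cases him : n + 1 ≤ i
    · rw [if_pos him] at h
      cases h
      refine ⟨?_, by simp, by simp⟩
      apply pvEq_of_getD
      · rw [hlen, show wChain [] (eBase n) = eBase n from rfl]; simp [eBase]
      · intro k
        rw [show wChain [] (eBase n) = eBase n from rfl, getD_eBase]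
        by_cases hk0 : k = 0
        · subst hk0; rw [if_pos rfl]; exact ha0
        · rw [if_neg hk0]
          by_cases hk : k < a.length
          · exact hzero k (by omega) (by omega)
          · exact List.getD_eq_default a _ (by omega)
    · rw [if_neg him] at h
      by_cases hgt : 1 < a.getD i 0
      · rw [if_pos hgt] at h
        cases h
      · rw [if_neg hgt] at h
        by_cases hz : a.getD i 0 = 0
        · rw [if_pos hz] at h
          obtain ⟨ha, hmem, hpair⟩ := ih (i + 1) a l h (by omega) hlen (by omega) ha0
            (by intro k hk1 hk2
                by_cases hki : k = i
                · subst hki; exact hz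
                · exact hzero k hk1 (by omega))
          exact ⟨ha, fun x hx => ⟨by have := (hmem x hx).1; omega, (hmem x hx).2⟩, hpair⟩
        · rw [if_neg hz] at h
          by_cases hC : ∀ k < n + 1, i ≤ k → 0 ≤ a.getD k 0 - a.getD (k - i) 0
          · rw [if_pos hC] at h
            cases hr : runA (n + 1) (sUpdTo i (n + 1 - 1) a) (i + 1) fuel with
            | none => rw [hr] at h; cases h
            | some l' =>
              rw [hr] at h
              simp only [Option.map_some, Option.some.injEq] at h
              subst h
              have hai : a.getD i 0 = 1 := by
                have := hC i (by omega) (le_refl i)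
                rw [Nat.sub_self, ha0] at this
                omega
              have hs0 : (sUpdTo i (n + 1 - 1) a).getD 0 0 = 1 := by
                rw [getD_sUpdTo i _ a 0 (by omega), if_neg (by omega)]
                exact ha0
              have hszero : ∀ k, 1 ≤ k → k < i + 1 → (sUpdTo i (n + 1 - 1) a).getD k 0 = 0 := by
                intro k hk1 hk2
                rw [getD_sUpdTo i _ a k (by omega)]
                by_cases hki : k = i
                · subst hki
                  rw [if_pos ⟨le_refl k, by omega⟩, Nat.sub_self, ha0, hai]
                  omega
                · rw [if_neg (by omega)]
                  exact hzero k hk1 (by omega)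
              obtain ⟨ha', hmem', hpair'⟩ := ih (i + 1) (sUpdTo i (n + 1 - 1) a) l' hr
                (by omega) (by rw [length_sUpdTo]; exact hlen) (by omega) hs0 hszero
              have hc1 : ∀ c ∈ l', 1 ≤ c := fun c hc => by have := (hmem' c hc).1; omega
              have hfla : a = wChain (i :: l') (eBase n) := by
                calc a = fl i (sUpdTo i (a.length - 1) a) := (fl_sUpdTo i a h1).symm
                  _ = fl i (sUpdTo i (n + 1 - 1) a) := by rw [hlen]
                  _ = fl i (wChain l' (eBase n)) := by rw [ha']
                  _ = wChain l' (fl i (eBase n)) := (wChain_fl_comm l' i (eBase n) h1 hc1).symm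
                  _ = wChain (i :: l') (eBase n) := rfl
              refine ⟨hfla, ?_, ?_⟩
              · intro x hx
                rcases List.mem_cons.mp hx with hx | hx
                · subst hx; exact ⟨le_refl x, by omega⟩
                · have := hmem' x hx
                  exact ⟨by omega, this.2⟩
              · rw [List.pairwise_cons]
                exact ⟨fun x hx => by have := (hmem' x hx).1; omega, hpair'⟩
          · rw [if_neg hC] at h
            cases h

-- T2b: if the input is the forward composite of a sorted coin list, B finds exactly that list
theorem runB_of_wchain (nw : List Int) (n : Nat) (fuel : Nat) :
    ∀ (i : Nat) (w : List Int) (lf : List Nat), 1 ≤ i → w.length = n + 1 → w.getD 0 0 = 1 →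
    n + 1 ≤ i + fuel → (∀ x ∈ lf, i ≤ x ∧ x < n + 1) → lf.Pairwise (· < ·) →
    (1 : Int) :: nw = wChain lf w →
    runB nw (n + 1) w i fuel = some lf := by
  induction fuel with
  | zero =>
    intro i w lf h1 hlen hw0 hfuel hmem hpair hG
    cases lf with
    | nil => rw [runB]
    | cons x rest =>
      have := hmem x (by simp)
      omega
  | succ fuel ih =>
    intro i w lf h1 hlen hw0 hfuel hmem hpair hG
    rw [runB]
    by_cases him : n + 1 ≤ i
    · rw [if_pos him]
      cases lf with
      | nil => rfl
      | cons x rest =>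
        have := hmem x (by simp)
        omega
    · rw [if_neg him]
      have hGi : ((1 : Int) :: nw).getD i 0 = nw.getD (i - 1) 0 := by
        have hieq : i = (i - 1) + 1 := by omega
        rw [hieq]
        rfl
      cases lf with
      | nil =>
        have hwi : nw.getD (i - 1) 0 = w.getD i 0 := by
          rw [← hGi, hG]
          rfl
        rw [if_neg (by omega), if_neg (by omega)]
        exact ih (i + 1) w [] (by omega) hlen hw0 (by omega) (by simp) (by simp) hG
      | cons x rest =>
        have hmemx := hmem x (by simp)
        have hrest_gt : ∀ c ∈ rest, x < c := (List.pairwise_cons.mp hpair).1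
        have hpair' := (List.pairwise_cons.mp hpair).2
        by_cases hx : x = i
        · subst hx
          have hrgt : ∀ c ∈ rest, x < c := hrest_gt
          have hfl0 : (fl x w).getD 0 0 = 1 := by
            rw [getD_fl x w 0 (by omega), fCoef_lt x w 0 (by omega), hw0]
          have hwi : nw.getD (x - 1) 0 = 1 + w.getD x 0 := by
            rw [← hGi, hG]
            calc (wChain (x :: rest) w).getD x 0 = (wChain rest (fl x w)).getD x 0 := rfl
              _ = (fl x w).getD x 0 := getD_wChain_lt rest (fl x w) x hrgt
              _ = fCoef x w x := getD_fl x w x (by omega)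
              _ = fCoef x w 0 + w.getD x 0 := by rw [fCoef_ge x w x h1 (le_refl x), Nat.sub_self]
              _ = 1 + w.getD x 0 := by rw [fCoef_lt x w 0 (by omega), hw0]
          rw [if_neg (by omega), if_pos (by omega)]
          have hrec := ih (x + 1) (fl x w) rest (by omega)
            (by rw [length_fl]; exact hlen) hfl0 (by omega)
            (fun c hc => ⟨by have := hrgt c hc; omega, (hmem c (by simp [hc])).2⟩)
            hpair' hG
          rw [hrec]
          rfl
        · have hgt : ∀ c ∈ (x :: rest), i < c := by
            intro c hc
            rcases List.mem_cons.mp hc with hc | hc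
            · subst hc; omega
            · have := hrest_gt c hc; omega
          have hwi : nw.getD (i - 1) 0 = w.getD i 0 := by
            rw [← hGi, hG]
            exact getD_wChain_lt (x :: rest) w i hgt
          rw [if_neg (by omega), if_neg (by omega)]
          exact ih (i + 1) w (x :: rest) (by omega) hlen hw0 (by omega)
            (fun c hc => ⟨by have := hgt c hc; omega, (hmem c hc).2⟩) hpair hG

-- ===== VERDICT (by name: the statement is the Claim_ definition above) =====
theorem find_coins_spec : Claim_equal_find_coins := by
  intro nw _
  unfold Spec_find_coins
  have hA : find_coins nw = pvOutA (nw.length + 1) ((1 : Int) :: nw) [] 1 (nw.length + 1) := by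
    simp [find_coins]
  have hB : find_coins_alt nw = pvOutB nw (eBase nw.length) [] 1 (nw.length + 1) := by
    simp [find_coins_alt, eBase]
  rw [hA, hB,
    pvOutA_runA (nw.length + 1) (by omega) (nw.length + 1) 1 ((1 : Int) :: nw) [] (by omega)
      (by simp),
    pvOutB_runB nw (nw.length + 1) (nw.length + 1) 1 (eBase nw.length) [] (by omega)
      (by simp [eBase])]
  cases hr : runB nw (nw.length + 1) (eBase nw.length) 1 (nw.length + 1) with
  | some l =>
    have h1 := runA_of_runB nw nw.length (nw.length + 1) 1 (eBase nw.length) l (by omega) hr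
    have helems := runB_mem nw (nw.length + 1) (nw.length + 1) 1 (eBase nw.length) l hr
    have hGe : (1 : Int) :: nw = wChain l (eBase nw.length) := by
      apply pvEq_of_getD
      · rw [length_wChain]
        simp [eBase]
      · intro k
        by_cases hk0 : k = 0
        · subst hk0
          rw [getD_wChain_lt l (eBase nw.length) 0
              (fun c hc => by have := (helems c hc).1; omega), getD_eBase]
          rfl
        · by_cases hk : k < nw.length + 1
          · exact (runB_wchain nw (nw.length + 1) (nw.length + 1) 1 (eBase nw.length) l
              (by omega) (by simp [eBase]) (by rw [getD_eBase]; simp) (by omega) hr k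
              (by omega) hk).symm
          · rw [List.getD_eq_default _ _ (by simp; omega),
              List.getD_eq_default _ _ (by rw [length_wChain]; simp [eBase]; omega)]
    rw [← hGe] at h1
    rw [h1]
  | none =>
    cases hra : runA (nw.length + 1) ((1 : Int) :: nw) 1 (nw.length + 1) with
    | none => rfl
    | some l =>
      obtain ⟨hforce, hmem, hpair⟩ := runA_forces nw nw.length (nw.length + 1) 1
        ((1 : Int) :: nw) l hra (le_refl 1) (by simp) (by omega) rfl
        (by intro k hk1 hk2; omega)
      have hB2 := runB_of_wchain nw nw.length (nw.length + 1) 1 (eBase nw.length) l (by omega)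
        (by simp [eBase]) (by rw [getD_eBase]; simp) (by omega) hmem hpair hforce
      rw [hr] at hB2
      cases hB2
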